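-- pv_equiv track=rewrite | github.com/victorboniface/boniface | dizi.py | normalize_episode_numbers
-- ===== SOURCE A (Python) =====
-- def normalize_episode_numbers(episode_links):
--     """Bölüm numaralarını sezona göre 1'den başlayacak şekilde düzenler"""
--
--     seasons = {}
--     for episode_url, season_num in episode_links:
--         if season_num not in seasons:
--             seasons[season_num] = []
--         seasons[season_num].append(episode_url)
--
--
--     normalized_episodes = []
--     for season_num in sorted(seasons.keys()):
--         episode_urls = seasons[season_num]
--         for idx, episode_url in enumerate(episode_urls, 1):
--             normalized_episodes.append((episode_url, season_num, idx))
--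
--     return normalized_episodes
-- ===== SOURCE B (Python) =====
-- def normalize_episode_numbers(episode_links):
--     """Bölüm numaralarını sezona göre 1'den başlayacak şekilde düzenler"""
--     ordered = sorted(episode_links, key=lambda x: x[1])
--     result = []
--     prev = None
--     idx = 0
--     for episode_url, season_num in ordered:
--         if prev is None or season_num != prev:
--             idx = 1
--         else:
--             idx += 1
--         result.append((episode_url, season_num, idx))
--         prev = season_num
--     return result
-- ===== Notes on version B (the rewrite author's own statement) =====
-- stated objective: simpler
-- what changed: Replaced the dict grouping plus nested emit with a stable sort by season followed by one pass that resets a 1-based counter at each season boundary.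
import Mathlib
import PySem

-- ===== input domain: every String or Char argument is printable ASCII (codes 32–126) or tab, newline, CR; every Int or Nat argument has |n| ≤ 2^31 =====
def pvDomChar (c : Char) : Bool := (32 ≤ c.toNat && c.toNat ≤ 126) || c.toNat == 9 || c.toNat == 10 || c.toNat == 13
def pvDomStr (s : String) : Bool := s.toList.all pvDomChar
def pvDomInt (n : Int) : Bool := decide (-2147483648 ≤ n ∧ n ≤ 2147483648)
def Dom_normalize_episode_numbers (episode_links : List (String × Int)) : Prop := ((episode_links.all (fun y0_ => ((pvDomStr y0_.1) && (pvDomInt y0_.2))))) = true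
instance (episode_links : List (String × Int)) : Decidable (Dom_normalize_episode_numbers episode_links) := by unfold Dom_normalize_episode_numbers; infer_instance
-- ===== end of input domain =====

-- B replaces A's dict grouping + nested emit by a stable sort on season and a single
-- counter-resetting pass (objective: simpler).

-- ===== PORT A =====
def normalize_episode_numbers (episode_links : List (String × Int)) : List (String × Int × Int) :=
  -- seasons = {}; for episode_url, season_num in episode_links: if absent insert []; append url
  let seasons : PySem.Dict Int (List String) :=
    episode_links.foldl (fun d p =>
      let d' := if d.contains p.2 then d else d.insert p.2 ([] : List String)
      d'.modify p.2 [] (fun l => l ++ [p.1])) PySem.Dict.empty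
  -- for season_num in sorted(seasons.keys()): for idx, url in enumerate(urls, 1): append (url, season, idx)
  (PySem.List.sorted seasons.keys (fun s => s)).foldl
    (fun acc s =>
      (PySem.List.enumerate (seasons.getD s []) 1).foldl
        (fun acc2 e => acc2 ++ [(e.2, s, e.1)]) acc) []

-- ===== PORT B =====
def normalize_episode_numbers_alt (episode_links : List (String × Int)) : List (String × Int × Int) :=
  let ordered := PySem.List.sorted episode_links (fun x => x.2)
  (ordered.foldl
    (fun (st : List (String × Int × Int) × Option Int × Int) p =>
      let i : Int := match st.2.1 with
        | none => 1
        | some prev => if p.2 ≠ prev then 1 else st.2.2 + 1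
      (st.1 ++ [(p.1, p.2, i)], some p.2, i))
    ([], none, 0)).1

-- ===== PRECONDITION & SPEC =====
def Spec_normalize_episode_numbers (episode_links : List (String × Int)) (out : List (String × Int × Int)) : Prop := out = normalize_episode_numbers_alt episode_links
instance (episode_links : List (String × Int)) (out : List (String × Int × Int)) : Decidable (Spec_normalize_episode_numbers episode_links out) := by unfold Spec_normalize_episode_numbers; infer_instance

-- ===== CLAIM (what is proved, stated in full; the proofs are below) =====
def Claim_equal_normalize_episode_numbers : Prop := ∀ (episode_links : List (String × Int)), Dom_normalize_episode_numbers episode_links → Spec_normalize_episode_numbers episode_links (normalize_episode_numbers episode_links)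

-- ===== LEMMAS AND PROOFS =====

-- the strict comparator B's stable sort uses
def pvBef (x y : String × Int) : Bool := decide (x.2 < y.2)

-- insertion of a new season into a sorted list of distinct seasons
def pvSIns (v : Int) : List Int → List Int
  | [] => [v]
  | s :: t => if v < s then v :: s :: t else if v = s then s :: t else s :: pvSIns v t

-- the per-season block of episodes, in input order
def pvBlocks (el : List (String × Int)) (s : Int) : List (String × Int) :=
  el.filter (fun p => p.2 == s)

-- one season's output block, as A emits it
def pvBlockOut (s : Int) (b : List (String × Int)) : List (String × Int × Int) :=
  (PySem.List.enumerate (b.map (fun p => p.1)) 1).map (fun e => (e.2, s, e.1))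

-- the sorted distinct seasons
def pvSeasons (el : List (String × Int)) : List Int :=
  PySem.List.sorted (PySem.Set.ofList (el.map (fun p => p.2))) (fun s => s)

-- the common normal form both ports are reduced to
def pvN (el : List (String × Int)) : List (String × Int × Int) :=
  (pvSeasons el).flatMap (fun s => pvBlockOut s (pvBlocks el s))

-- B's loop step
def pvStep (st : List (String × Int × Int) × Option Int × Int) (p : String × Int) :
    List (String × Int × Int) × Option Int × Int :=
  let i : Int := match st.2.1 with
    | none => 1
    | some prev => if p.2 ≠ prev then 1 else st.2.2 + 1
  (st.1 ++ [(p.1, p.2, i)], some p.2, i)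

lemma pv_collapse (d : PySem.Dict Int (List String)) (k : Int) (u : String) :
    (if d.contains k then d else d.insert k ([] : List String)).modify k [] (fun l => l ++ [u])
      = d.modify k [] (fun l => l ++ [u]) := by
  by_cases h : d.contains k
  · simp [h]
  · simp only [Bool.not_eq_true] at h
    simp only [h, Bool.false_eq_true, if_false, PySem.Dict.modify,
      PySem.Dict.getD_insert_self, PySem.Dict.insert_insert_self,
      PySem.Dict.getD_of_not_contains d _ h]

lemma pv_dictfold (el : List (String × Int)) (d : PySem.Dict Int (List String)) :
    el.foldl (fun d p =>
      let d' := if d.contains p.2 then d else d.insert p.2 ([] : List String)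
      d'.modify p.2 [] (fun l => l ++ [p.1])) d
    = el.foldl (fun d p => d.modify p.2 [] (fun l => l ++ [p.1])) d := by
  induction el generalizing d with
  | nil => rfl
  | cons p t ih => simp only [List.foldl_cons]; rw [pv_collapse]; exact ih _

lemma pv_getD (el : List (String × Int)) (s : Int) :
    (el.foldl (fun d p => d.modify p.2 [] (fun l => l ++ [p.1])) PySem.Dict.empty).getD s []
      = (pvBlocks el s).map (fun p => p.1) := by
  have h := PySem.Dict.getD_foldl_modify_append (el.map (fun p => (p.2, p.1))) PySem.Dict.empty s
  rw [List.foldl_map] at h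
  simpa [pvBlocks, List.filter_map, List.map_map, Function.comp, PySem.Dict.getD_empty] using h

lemma pv_keys (el : List (String × Int)) :
    (el.foldl (fun d p => d.modify p.2 [] (fun l => l ++ [p.1])) PySem.Dict.empty).keys
      = PySem.Set.ofList (el.map (fun p => p.2)) := by
  have h := PySem.Dict.keys_foldl_modify_key (ν := List String) el (fun p => p.2) []
    (fun _ p => fun l => l ++ [p.1]) PySem.Dict.empty
  simpa [PySem.Dict.keys_empty, PySem.Set.ofList_eq_foldl, PySem.Set.update_eq_foldl] using h

lemma pv_a_eq_n (el : List (String × Int)) : normalize_episode_numbers el = pvN el := by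
  simp only [normalize_episode_numbers]
  rw [pv_dictfold]
  rw [pv_keys]
  simp only [pv_getD, PySem.List.foldl_append_singleton_eq_map, PySem.List.foldl_append_eq_flatMap]
  simp [pvN, pvSeasons, pvBlockOut]

lemma pv_sins_mem (v : Int) (L : List Int) (hL : L.Pairwise (· < ·)) (hv : v ∈ L) :
    pvSIns v L = L := by
  induction L with
  | nil => cases hv
  | cons s t ih =>
    rcases List.mem_cons.1 hv with rfl | hv'
    · simp [pvSIns]
    · have hs : s < v := (List.pairwise_cons.1 hL).1 v hv'
      simp only [pvSIns, if_neg (by omega : ¬ v < s), if_neg (by omega : ¬ v = s)]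
      rw [ih (List.pairwise_cons.1 hL).2 hv']

lemma pv_insertBy_id (v : Int) (L : List Int) (hv : v ∉ L) :
    PySem.List.insertBy (fun a b => decide (a < b)) v L = pvSIns v L := by
  induction L with
  | nil => rfl
  | cons s t ih =>
    by_cases h : v < s
    · simp [PySem.List.insertBy, pvSIns, h]
    · have hne : v ≠ s := fun h' => hv (h' ▸ List.mem_cons_self ..)
      simp only [PySem.List.insertBy, decide_eq_true_eq, if_neg h, pvSIns, if_neg hne]
      rw [ih (fun h' => hv (List.mem_cons_of_mem _ h'))]

lemma pv_skip (x : String × Int) (ys zs : List (String × Int))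
    (h : ∀ y ∈ ys, pvBef x y = false) :
    PySem.List.insertBy pvBef x (ys ++ zs) = ys ++ PySem.List.insertBy pvBef x zs := by
  induction ys with
  | nil => rfl
  | cons y t ih =>
    simp only [List.cons_append, PySem.List.insertBy, h y (List.mem_cons_self ..),
      Bool.false_eq_true, if_false]
    rw [ih (fun y' hy' => h y' (List.mem_cons_of_mem _ hy'))]

lemma pv_ins (x : String × Int) (g : Int → List (String × Int)) :
    ∀ (L : List Int), L.Pairwise (· < ·) →
    (∀ s ∈ L, (∀ p ∈ g s, p.2 = s) ∧ g s ≠ []) →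
    (x.2 ∉ L → g x.2 = []) →
    PySem.List.insertBy pvBef x (L.flatMap g)
      = (pvSIns x.2 L).flatMap (fun s => g s ++ if s = x.2 then [x] else []) := by
  intro L
  induction L with
  | nil =>
    intro _ _ hx
    simp [pvSIns, PySem.List.insertBy, hx (by simp)]
  | cons s t ih =>
    intro hL hg hx
    have hps := List.pairwise_cons.1 hL
    have hgs := hg s (List.mem_cons_self ..)
    rcases lt_trichotomy x.2 s with hlt | rfl | hgt
    · -- x.2 < s : x goes in front
      have hxt : x.2 ∉ s :: t := by
        intro hmem
        rcases List.mem_cons.1 hmem with rfl | h'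
        · omega
        · exact absurd (hps.1 _ h') (by omega)
      obtain ⟨y, ys, hy⟩ : ∃ y ys, g s = y :: ys := by
        cases hgse : g s with
        | nil => exact absurd hgse hgs.2
        | cons y ys => exact ⟨y, ys, rfl⟩
      have hbef : pvBef x y = true := by
        have : y.2 = s := hgs.1 y (by rw [hy]; exact List.mem_cons_self ..)
        simp [pvBef, this, hlt]
      simp only [pvSIns, if_pos hlt, List.flatMap_cons, hy, List.cons_append,
        PySem.List.insertBy, hbef, if_pos]
      rw [hx hxt]
      have h1 : ∀ s' ∈ t, ¬ s' = x.2 := fun s' hs' h' => absurd (hps.1 s' hs') (by omega)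
      have hcongr : List.flatMap (fun s' => g s' ++ if s' = x.2 then [x] else []) t = List.flatMap g t :=
        List.flatMap_congr (fun s' hs' => by rw [if_neg (h1 s' hs'), List.append_nil])
      rw [show (fun s => g s ++ if s = x.2 then [x] else []) = (fun s' => g s' ++ if s' = x.2 then [x] else []) from rfl, hcongr]
      simp [if_neg (by omega : ¬ s = x.2)]
    · -- x.2 = s : x goes after block s
      have hskip : ∀ y ∈ g x.2, pvBef x y = false := by
        intro y hy
        have : y.2 = x.2 := hgs.1 y hy
        simp [pvBef, this]
      rw [List.flatMap_cons, pv_skip x _ _ hskip]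
      have hins : PySem.List.insertBy pvBef x (t.flatMap g) = x :: t.flatMap g := by
        cases hft : t.flatMap g with
        | nil => rfl
        | cons y ys =>
          have hy : y ∈ t.flatMap g := by rw [hft]; exact List.mem_cons_self ..
          obtain ⟨s', hs', hys'⟩ := List.mem_flatMap.1 hy
          have : y.2 = s' := (hg s' (List.mem_cons_of_mem _ hs')).1 y hys'
          have hbef : pvBef x y = true := by
            simp [pvBef, this]; exact hps.1 s' hs'
          simp [PySem.List.insertBy, hbef]
      rw [hins]
      simp only [pvSIns, if_neg (by omega : ¬ x.2 < x.2), if_true,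
        List.flatMap_cons]
      have h1 : ∀ s' ∈ t, ¬ s' = x.2 := fun s' hs' h' => absurd (hps.1 s' hs') (by omega)
      have hcongr : List.flatMap (fun s' => g s' ++ if s' = x.2 then [x] else []) t = List.flatMap g t :=
        List.flatMap_congr (fun s' hs' => by rw [if_neg (h1 s' hs'), List.append_nil])
      rw [show (fun s => g s ++ if s = x.2 then [x] else []) = (fun s' => g s' ++ if s' = x.2 then [x] else []) from rfl, hcongr]
      simp
    · -- s < x.2 : skip block s, recurse
      have hskip : ∀ y ∈ g s, pvBef x y = false := by
        intro y hy
        have : y.2 = s := hgs.1 y hy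
        simp [pvBef, this]; omega
      rw [List.flatMap_cons, pv_skip x _ _ hskip]
      rw [ih hps.2 (fun s' hs' => hg s' (List.mem_cons_of_mem _ hs'))
        (fun h' => hx (fun hmem => by
          rcases List.mem_cons.1 hmem with rfl | h'' ; omega; exact h' h''))]
      simp only [pvSIns, if_neg (by omega : ¬ x.2 < s), if_neg (by omega : ¬ x.2 = s),
        List.flatMap_cons, if_neg (by omega : ¬ s = x.2), List.append_nil]

lemma pv_seasons_snoc (el : List (String × Int)) (x : String × Int) :
    pvSeasons (el ++ [x]) = pvSIns x.2 (pvSeasons el) := by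
  have hpair : (pvSeasons el).Pairwise (· < ·) :=
    PySem.List.sorted_ofList_pairwise_lt (el.map (fun p => p.2))
  have hofl : PySem.Set.ofList ((el ++ [x]).map (fun p => p.2))
      = PySem.Set.add (PySem.Set.ofList (el.map (fun p => p.2))) x.2 := by
    simp [PySem.Set.ofList_eq_foldl, List.foldl_append]
  by_cases hmem : x.2 ∈ el.map (fun p => p.2)
  · have hadd : PySem.Set.add (PySem.Set.ofList (el.map (fun p => p.2))) x.2
        = PySem.Set.ofList (el.map (fun p => p.2)) := by
      have : PySem.Set.contains (PySem.Set.ofList (el.map (fun p => p.2))) x.2 = true := by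
        simp [PySem.Set.contains]
        obtain ⟨p, hp, hps⟩ := List.mem_map.1 hmem
        exact ⟨p.1, by rw [← hps]; simpa using hp⟩
      simp only [PySem.Set.add, this, if_true]
    have hsins : pvSIns x.2 (pvSeasons el) = pvSeasons el :=
      pv_sins_mem x.2 _ hpair
        ((PySem.List.mem_sorted _ _ _ _).2 ((PySem.Set.mem_ofList _ _).2 hmem))
    rw [hsins]
    unfold pvSeasons
    rw [hofl, hadd]
  · have hadd : PySem.Set.add (PySem.Set.ofList (el.map (fun p => p.2))) x.2
        = PySem.Set.ofList (el.map (fun p => p.2)) ++ [x.2] := by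
      have : PySem.Set.contains (PySem.Set.ofList (el.map (fun p => p.2))) x.2 = false := by
        simp [PySem.Set.contains]
        intro a ha
        exact hmem (List.mem_map.2 ⟨(a, x.2), ha, rfl⟩)
      simp only [PySem.Set.add, this, Bool.false_eq_true, if_false]
    have hnm : x.2 ∉ pvSeasons el := fun h =>
      hmem ((PySem.Set.mem_ofList _ _).1 ((PySem.List.mem_sorted _ _ _ _).1 h))
    unfold pvSeasons
    rw [hofl, hadd, PySem.List.sorted_eq_foldl_insertBy, List.foldl_append,
      ← PySem.List.sorted_eq_foldl_insertBy]
    simpa using pv_insertBy_id x.2 (pvSeasons el) hnm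

lemma pv_blocks_props (el : List (String × Int)) :
    ∀ s ∈ pvSeasons el, (∀ p ∈ pvBlocks el s, p.2 = s) ∧ pvBlocks el s ≠ [] := by
  intro s hs
  constructor
  · intro p hp
    have := List.mem_filter.1 hp
    simpa using this.2
  · have : s ∈ el.map (fun p => p.2) :=
      (PySem.Set.mem_ofList _ _).1 ((PySem.List.mem_sorted _ _ _ _).1 hs)
    obtain ⟨p, hp, hps⟩ := List.mem_map.1 this
    exact List.ne_nil_of_mem (List.mem_filter.2 ⟨hp, by simp [hps]⟩)

lemma pv_blocks_empty (el : List (String × Int)) (v : Int) (h : v ∉ pvSeasons el) :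
    pvBlocks el v = [] := by
  simp only [pvBlocks]
  rw [List.filter_eq_nil_iff]
  intro p hp hbeq
  have : p.2 = v := by simpa using hbeq
  exact h ((PySem.List.mem_sorted _ _ _ _).2
    ((PySem.Set.mem_ofList _ _).2 (List.mem_map.2 ⟨p, hp, this⟩)))

lemma pv_sorted_blocks (el : List (String × Int)) :
    PySem.List.sorted el (fun x => x.2) = (pvSeasons el).flatMap (pvBlocks el) := by
  induction el using List.reverseRecOn with
  | nil => rfl
  | append_singleton el x ih =>
    rw [PySem.List.sorted_eq_foldl_insertBy, List.foldl_append,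
      ← PySem.List.sorted_eq_foldl_insertBy, ih, List.foldl_cons, List.foldl_nil]
    have hstep : PySem.List.insertBy (fun a b => decide (a.2 < b.2)) x
        ((pvSeasons el).flatMap (pvBlocks el))
        = PySem.List.insertBy pvBef x ((pvSeasons el).flatMap (pvBlocks el)) := rfl
    rw [hstep, pv_ins x (pvBlocks el) (pvSeasons el)
      (PySem.List.sorted_ofList_pairwise_lt (el.map (fun p => p.2)))
      (pv_blocks_props el) (pv_blocks_empty el x.2), pv_seasons_snoc]
    apply List.flatMap_congr
    intro s hs
    simp only [pvBlocks, List.filter_append, List.filter_cons, List.filter_nil]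
    by_cases h : s = x.2
    · simp [h]
    · simp [h, Ne.symm h]

lemma pv_block_fold (s : Int) (b : List (String × Int)) (hb : ∀ p ∈ b, p.2 = s) :
    ∀ (res : List (String × Int × Int)) (idx : Int),
    b.foldl pvStep (res, some s, idx)
      = (res ++ (PySem.List.enumerate (b.map (fun p => p.1)) (idx + 1)).map
          (fun e => (e.2, s, e.1)), some s, idx + b.length) := by
  induction b with
  | nil => intro res idx; simp
  | cons p t ih =>
    intro res idx
    have hps : p.2 = s := hb p (List.mem_cons_self ..)
    have hstep : pvStep (res, some s, idx) p = (res ++ [(p.1, s, idx + 1)], some s, idx + 1) := by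
      simp [pvStep, hps]
    rw [List.foldl_cons, hstep, ih (fun q hq => hb q (List.mem_cons_of_mem _ hq))]
    simp only [List.map_cons, PySem.List.enumerate_cons, List.map_cons, List.length_cons,
      Prod.mk.injEq]
    refine ⟨by simp, trivial, by push_cast; ring⟩

lemma pv_enter_fold (s : Int) (b : List (String × Int)) (hb : b ≠ [])
    (h : ∀ p ∈ b, p.2 = s) (res : List (String × Int × Int)) (prev : Option Int)
    (idx : Int) (hprev : prev ≠ some s) :
    b.foldl pvStep (res, prev, idx)
      = (res ++ pvBlockOut s b, some s, (b.length : Int)) := by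
  cases b with
  | nil => exact absurd rfl hb
  | cons p t =>
    have hps : p.2 = s := h p (List.mem_cons_self ..)
    have hstep : pvStep (res, prev, idx) p = (res ++ [(p.1, s, 1)], some s, 1) := by
      cases prev with
      | none => simp [pvStep, hps]
      | some pr =>
        have hne : s ≠ pr := fun h' => hprev (by rw [h'])
        simp [pvStep, hps, hne]
    rw [List.foldl_cons, hstep, pv_block_fold s t (fun q hq => h q (List.mem_cons_of_mem _ hq))]
    simp only [pvBlockOut, List.map_cons, PySem.List.enumerate_cons, List.map_cons,
      List.length_cons, Prod.mk.injEq]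
    refine ⟨by simp, trivial, by push_cast; ring⟩

lemma pv_outer_fold (g : Int → List (String × Int)) :
    ∀ (L : List Int), L.Pairwise (· < ·) →
    (∀ s ∈ L, (∀ p ∈ g s, p.2 = s) ∧ g s ≠ []) →
    ∀ (res : List (String × Int × Int)) (prev : Option Int) (idx : Int),
    (∀ s ∈ L, prev ≠ some s) →
    ((L.flatMap g).foldl pvStep (res, prev, idx)).1
      = res ++ L.flatMap (fun s => pvBlockOut s (g s)) := by
  intro L
  induction L with
  | nil => intro _ _ res prev idx _; simp
  | cons s t ih =>
    intro hL hg res prev idx hprev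
    have hps := List.pairwise_cons.1 hL
    have hgs := hg s (List.mem_cons_self ..)
    rw [List.flatMap_cons, List.foldl_append,
      pv_enter_fold s (g s) hgs.2 hgs.1 res prev idx (hprev s (List.mem_cons_self ..))]
    rw [ih hps.2 (fun s' hs' => hg s' (List.mem_cons_of_mem _ hs'))
      (res ++ pvBlockOut s (g s)) (some s) (g s).length
      (fun s' hs' h' => absurd (hps.1 s' hs') (by injection h' with h''; omega))]
    simp

lemma pv_b_eq_n (el : List (String × Int)) : normalize_episode_numbers_alt el = pvN el := by
  show ((PySem.List.sorted el (fun x => x.2)).foldl pvStep ([], none, 0)).1 = pvN el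
  rw [pv_sorted_blocks el,
    pv_outer_fold (pvBlocks el) (pvSeasons el)
      (PySem.List.sorted_ofList_pairwise_lt (el.map (fun p => p.2)))
      (pv_blocks_props el) [] none 0 (fun s _ h => by cases h)]
  simp [pvN]

-- ===== VERDICT (by name: the statement is the Claim_ definition above) =====
theorem normalize_episode_numbers_spec : Claim_equal_normalize_episode_numbers := by
  intro el _
  show normalize_episode_numbers el = normalize_episode_numbers_alt el
  rw [pv_a_eq_n, pv_b_eq_n]
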